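-- pv_equiv track=rewrite | github.com/Amit33-design/Network-Automation | backend/sim_engine.py | _check_partition
-- ===== SOURCE A (Python) =====
-- def _check_partition(graph: dict[str, list[str]], failed: list[str]) -> bool:
--     """Return True if removing failed nodes disconnects the graph."""
--     remaining = {n: [nb for nb in nb_list if nb not in failed]
--                  for n, nb_list in graph.items() if n not in failed}
--     if not remaining:
--         return True
--     # BFS from first remaining node
--     start     = next(iter(remaining))
--     visited   = set()
--     queue     = [start]
--     while queue:
--         node = queue.pop()
--         if node in visited:
--             continue
--         visited.add(node)
--         for nb in remaining.get(node, []):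
--             if nb not in visited and nb not in failed:
--                 queue.append(nb)
--     return visited != set(remaining.keys())
-- ===== SOURCE B (Python) =====
-- def _check_partition(graph: dict[str, list[str]], failed: list[str]) -> bool:
--     """Return True if removing failed nodes disconnects the graph."""
--     remaining = {n: [nb for nb in nb_list if nb not in failed]
--                  for n, nb_list in graph.items() if n not in failed}
--     if not remaining:
--         return True
--     # frontier-by-frontier (level) expansion with set operations from the first node
--     start = next(iter(remaining))
--     visited = {start}
--     frontier = {start}
--     while frontier:
--         frontier = {nb for node in frontier
--                        for nb in remaining.get(node, [])
--                        if nb not in failed} - visited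
--         visited |= frontier
--     return visited != set(remaining)
-- ===== Notes on version B (the rewrite author's own statement) =====
-- stated objective: alternative
-- what changed: Replaces A's explicit-stack search (pop, skip-if-visited, push unvisited neighbours one by one) by an idiomatic set-based breadth-first expansion: a whole-frontier set comprehension minus visited per round, unioned into visited until the frontier is empty.
import Mathlib
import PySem

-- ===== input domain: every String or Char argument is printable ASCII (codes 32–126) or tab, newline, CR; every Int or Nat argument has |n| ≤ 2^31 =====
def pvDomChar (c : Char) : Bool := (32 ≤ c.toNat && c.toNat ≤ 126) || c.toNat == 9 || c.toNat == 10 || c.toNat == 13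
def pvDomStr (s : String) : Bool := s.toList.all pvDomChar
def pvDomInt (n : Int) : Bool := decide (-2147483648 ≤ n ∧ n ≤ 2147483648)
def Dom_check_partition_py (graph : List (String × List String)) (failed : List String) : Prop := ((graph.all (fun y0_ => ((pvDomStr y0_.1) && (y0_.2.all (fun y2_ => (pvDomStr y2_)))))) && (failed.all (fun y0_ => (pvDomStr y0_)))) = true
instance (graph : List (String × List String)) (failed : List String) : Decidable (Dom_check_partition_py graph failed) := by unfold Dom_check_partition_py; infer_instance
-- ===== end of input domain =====

-- A and B share the same first line (the dict comprehension building `remaining`); the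
-- algorithmic difference is the search loop.  Equivalence is about the return value only.

-- `remaining = {n: [nb for nb in nb_list if nb not in failed] for n, nb_list in graph.items() if n not in failed}`
def pvRemaining (graph : List (String × List String)) (failed : List String) :
    PySem.Dict String (List String) :=
  graph.foldl
    (fun d p =>
      if failed.contains p.1 then d
      else d.insert p.1 (p.2.filter (fun nb => !(failed.contains nb))))
    PySem.Dict.empty

-- every element of any value list of `d` (looked up with default []) lies in d.values.flatten
theorem pv_mem_getD_flatten (d : PySem.Dict String (List String)) (k y : String)
    (hy : y ∈ d.getD k []) : y ∈ d.values.flatten := by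
  rw [PySem.Dict.getD_eq_get?_getD] at hy
  obtain ⟨items⟩ := d
  induction items with
  | nil => simp [PySem.Dict.get?] at hy
  | cons p rest ih =>
    obtain ⟨a, l⟩ := p
    rw [PySem.Dict.get?_mk_cons] at hy
    by_cases h : (a == k) = true
    · simp [h] at hy
      simp [PySem.Dict.values, hy]
    · simp [h] at hy
      have := ih hy
      simp [PySem.Dict.values] at this ⊢
      exact Or.inr this

-- the node universe used for the termination measures of both loops
def pvUniv (d : PySem.Dict String (List String)) (start : String) : List String :=
  start :: d.values.flatten

theorem pvUniv_spec (d : PySem.Dict String (List String)) (start : String) :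
    ∀ k, ∀ y ∈ d.getD k [], y ∈ pvUniv d start := by
  intro k y hy
  exact List.mem_cons_of_mem _ (pv_mem_getD_flatten d k y hy)

-- ===== PORT A =====
-- the `while queue` loop of A: pop from the back, skip visited, push unvisited/unfailed
-- neighbours; `hq` only feeds the termination measure
def pvLoopA (failed : List String) (rem : PySem.Dict String (List String)) (U : List String)
    (hU : ∀ k, ∀ y ∈ rem.getD k [], y ∈ U)
    (visited : PySem.Set String) (queue : List String)
    (hq : ∀ x ∈ queue, x ∈ U) : PySem.Set String :=
  match queue, hq with
  | [], _ => visited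
  | a :: t, hq =>
    let node := (a :: t).getLast (by simp)
    if hv : PySem.Set.contains visited node then
      pvLoopA failed rem U hU visited ((a :: t).dropLast)
        (fun x hx => hq x ((List.dropLast_sublist (a :: t)).mem hx))
    else
      pvLoopA failed rem U hU (PySem.Set.add visited node)
        ((a :: t).dropLast ++ ((rem.getD node []).filter
            (fun nb => !(PySem.Set.contains (PySem.Set.add visited node) nb)
                        && !(failed.contains nb))))
        (by
          intro x hx
          rcases List.mem_append.mp hx with h | h
          · exact hq x ((List.dropLast_sublist (a :: t)).mem h)
          · exact hU node x (List.mem_of_mem_filter h))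
  termination_by ((U.toFinset \ visited.toFinset).card, queue.length)
  decreasing_by
  · apply Prod.Lex.right
    simp [List.length_dropLast]
  · apply Prod.Lex.left
    have hnodeU : node ∈ U := hq _ (List.getLast_mem (by simp))
    have hnodev : node ∉ visited := by
      simpa [PySem.Set.contains_iff] using hv
    have hsub : U.toFinset \ (PySem.Set.add visited node).toFinset ⊆
        U.toFinset \ visited.toFinset := by
      intro x hx
      simp only [Finset.mem_sdiff, List.mem_toFinset] at hx ⊢
      exact ⟨hx.1, fun hxv => hx.2 (by simp [PySem.Set.mem_add, hxv])⟩
    apply Finset.card_lt_card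
    refine ⟨hsub, fun hsup => ?_⟩
    have : node ∈ U.toFinset \ visited.toFinset := by
      simp [Finset.mem_sdiff, hnodeU, hnodev]
    have := hsup this
    simp [Finset.mem_sdiff, PySem.Set.mem_add] at this
    exact this.2.2 rfl

def check_partition_py (graph : List (String × List String)) (failed : List String) : Bool :=
  match (pvRemaining graph failed).keys with
  | [] => true                      -- `if not remaining: return True`
  | start :: _ =>
    !(PySem.Set.equal
        (pvLoopA failed (pvRemaining graph failed)
          (pvUniv (pvRemaining graph failed) start)
          (pvUniv_spec _ start)
          PySem.Set.empty [start]
          (by intro x hx; simp only [List.mem_singleton] at hx; simp [pvUniv, hx]))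
        (PySem.Set.ofList (pvRemaining graph failed).keys))

-- ===== PORT B =====
-- one step of B's loop decreases the lexicographic measure
theorem pv_step_lex (U : List String) (visited F' : PySem.Set String) (n : Nat) (hn : 0 < n)
    (hF'U : ∀ x ∈ F', x ∈ U) (hF'v : ∀ x ∈ F', x ∉ visited) :
    Prod.Lex (· < ·) (· < ·)
      ((U.toFinset \ (PySem.Set.union visited F').toFinset).card, F'.length)
      ((U.toFinset \ visited.toFinset).card, n) := by
  match hf : F' with
  | [] =>
    have hv : PySem.Set.union visited ([] : PySem.Set String) = visited := rfl
    rw [hv]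
    exact Prod.Lex.right _ hn
  | x :: s =>
    apply Prod.Lex.left
    have hxU : x ∈ U := hF'U x List.mem_cons_self
    have hxv : x ∉ visited := hF'v x List.mem_cons_self
    have hsub : U.toFinset \ (PySem.Set.union visited (x :: s)).toFinset ⊆
        U.toFinset \ visited.toFinset := by
      intro z hz
      simp only [Finset.mem_sdiff, List.mem_toFinset] at hz ⊢
      exact ⟨hz.1, fun hzv => hz.2 ((PySem.Set.mem_union _ _ _).mpr (Or.inl hzv))⟩
    apply Finset.card_lt_card
    refine ⟨hsub, fun hsup => ?_⟩
    have hmem : x ∈ U.toFinset \ visited.toFinset := by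
      simp [Finset.mem_sdiff, hxU, hxv]
    have := hsup hmem
    simp only [Finset.mem_sdiff, List.mem_toFinset] at this
    exact this.2 ((PySem.Set.mem_union _ _ _).mpr (Or.inr List.mem_cons_self))

-- B's `while frontier` loop: whole-frontier neighbour set minus visited, then union
def pvLoopB (failed : List String) (rem : PySem.Dict String (List String)) (U : List String)
    (hU : ∀ k, ∀ y ∈ rem.getD k [], y ∈ U)
    (visited frontier : PySem.Set String) : PySem.Set String :=
  match frontier with
  | [] => visited
  | a :: t =>
    pvLoopB failed rem U hU
      (PySem.Set.union visited (PySem.Set.diff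
        (PySem.Set.ofList ((a :: t).flatMap
          (fun node => (rem.getD node []).filter (fun nb => !(failed.contains nb)))))
        visited))
      (PySem.Set.diff
        (PySem.Set.ofList ((a :: t).flatMap
          (fun node => (rem.getD node []).filter (fun nb => !(failed.contains nb)))))
        visited)
  termination_by ((U.toFinset \ visited.toFinset).card, frontier.length)
  decreasing_by
    exact pv_step_lex U visited _ (a :: t).length (by simp)
      (fun x hx => by
        have hx' := (PySem.Set.mem_diff _ _ _).mp hx
        have := (PySem.Set.mem_ofList _ _).mp hx'.1
        rw [List.mem_flatMap] at this
        obtain ⟨node, _, hmem⟩ := this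
        exact hU node x (List.mem_of_mem_filter hmem))
      (fun x hx => ((PySem.Set.mem_diff _ _ _).mp hx).2)

def check_partition_py_alt (graph : List (String × List String)) (failed : List String) : Bool :=
  match (pvRemaining graph failed).keys with
  | [] => true
  | start :: _ =>
    !(PySem.Set.equal
        (pvLoopB failed (pvRemaining graph failed)
          (pvUniv (pvRemaining graph failed) start)
          (pvUniv_spec _ start)
          (PySem.Set.ofList [start]) (PySem.Set.ofList [start]))
        (PySem.Set.ofList (pvRemaining graph failed).keys))

-- ===== PRECONDITION & SPEC =====
def Spec_check_partition_py (graph : List (String × List String)) (failed : List String) (out : Bool) : Prop := out = check_partition_py_alt graph failed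
instance (graph : List (String × List String)) (failed : List String) (out : Bool) : Decidable (Spec_check_partition_py graph failed out) := by unfold Spec_check_partition_py; infer_instance

-- ===== CLAIM (what is proved, stated in full; the proofs are below) =====
def Claim_equal_check_partition_py : Prop := ∀ (graph : List (String × List String)) (failed : List String), Dom_check_partition_py graph failed → Spec_check_partition_py graph failed (check_partition_py graph failed)

-- ===== LEMMAS AND PROOFS =====

-- the edge relation both loops follow: neighbour lists of `rem`, failed nodes removed
def pvAdj (failed : List String) (rem : PySem.Dict String (List String)) (x : String) :
    List String :=
  (rem.getD x []).filter (fun nb => !(failed.contains nb))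

theorem pvLoopA_subset (failed : List String) (rem : PySem.Dict String (List String))
    (U : List String) (hU : ∀ k, ∀ y ∈ rem.getD k [], y ∈ U)
    (P : String → Prop) (hP : ∀ x, P x → ∀ y ∈ pvAdj failed rem x, P y) :
    ∀ (visited : PySem.Set String) (queue : List String) (hq : ∀ x ∈ queue, x ∈ U),
      (∀ x ∈ visited, P x) → (∀ x ∈ queue, P x) →
      ∀ x ∈ pvLoopA failed rem U hU visited queue hq, P x := by
  intro visited queue hq
  induction visited, queue, hq using pvLoopA.induct failed rem U hU with
  | case1 visited h1 h2 =>
    intro hvP _ x hx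
    rw [pvLoopA] at hx
    exact hvP x hx
  | case2 visited a t hq node hv hq' ih =>
    intro hvP hqP x hx
    rw [pvLoopA] at hx
    rw [dif_pos hv] at hx
    exact ih hvP (fun y hy => hqP y ((List.dropLast_sublist (a :: t)).mem hy)) x hx
  | case3 visited a t hq node hv hq' ih =>
    intro hvP hqP x hx
    rw [pvLoopA] at hx
    rw [dif_neg hv] at hx
    have hnode : P ((a :: t).getLast (by simp)) := hqP _ (List.getLast_mem (by simp))
    refine ih ?_ ?_ x hx
    · intro y hy
      rcases (PySem.Set.mem_add _ _ _).mp hy with h | h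
      · exact hvP y h
      · exact h ▸ hnode
    · intro y hy
      rcases List.mem_append.mp hy with h | h
      · exact hqP y ((List.dropLast_sublist (a :: t)).mem h)
      · have h' := List.mem_filter.mp h
        have hyadj : y ∈ pvAdj failed rem ((a :: t).getLast (by simp)) := by
          refine List.mem_filter.mpr ⟨h'.1, ?_⟩
          have := h'.2
          simp only [Bool.and_eq_true] at this
          exact this.2
        exact hP _ hnode y hyadj

theorem pvLoopA_mono (failed : List String) (rem : PySem.Dict String (List String))
    (U : List String) (hU : ∀ k, ∀ y ∈ rem.getD k [], y ∈ U) :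
    ∀ (visited : PySem.Set String) (queue : List String) (hq : ∀ x ∈ queue, x ∈ U),
      ∀ x, (x ∈ visited ∨ x ∈ queue) → x ∈ pvLoopA failed rem U hU visited queue hq := by
  intro visited queue hq
  induction visited, queue, hq using pvLoopA.induct failed rem U hU with
  | case1 visited h1 h2 =>
    intro x hx
    rw [pvLoopA]
    rcases hx with h | h
    · exact h
    · exact absurd h (List.not_mem_nil)
  | case2 visited a t hq node hv hq' ih =>
    intro x hx
    rw [pvLoopA, dif_pos hv]
    rcases hx with h | h
    · exact ih x (Or.inl h)
    · rw [← List.dropLast_concat_getLast (l := a :: t) (by simp), List.mem_append] at h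
      rcases h with h | h
      · exact ih x (Or.inr h)
      · rw [List.mem_singleton] at h
        subst h
        exact ih _ (Or.inl ((PySem.Set.contains_iff _ _).mp hv))
  | case3 visited a t hq node hv hq' ih =>
    intro x hx
    rw [pvLoopA, dif_neg hv]
    rcases hx with h | h
    · exact ih x (Or.inl ((PySem.Set.mem_add _ _ _).mpr (Or.inl h)))
    · rw [← List.dropLast_concat_getLast (l := a :: t) (by simp), List.mem_append] at h
      rcases h with h | h
      · exact ih x (Or.inr (List.mem_append.mpr (Or.inl h)))
      · rw [List.mem_singleton] at h
        subst h
        exact ih _ (Or.inl ((PySem.Set.mem_add _ _ _).mpr (Or.inr rfl)))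

theorem pvLoopA_closed (failed : List String) (rem : PySem.Dict String (List String))
    (U : List String) (hU : ∀ k, ∀ y ∈ rem.getD k [], y ∈ U) :
    ∀ (visited : PySem.Set String) (queue : List String) (hq : ∀ x ∈ queue, x ∈ U),
      (∀ x ∈ visited, ∀ y ∈ pvAdj failed rem x, y ∈ visited ∨ y ∈ queue) →
      ∀ x ∈ pvLoopA failed rem U hU visited queue hq,
        ∀ y ∈ pvAdj failed rem x, y ∈ pvLoopA failed rem U hU visited queue hq := by
  intro visited queue hq
  induction visited, queue, hq using pvLoopA.induct failed rem U hU with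
  | case1 visited h1 h2 =>
    intro hinv x hx y hy
    rw [pvLoopA] at hx ⊢
    rcases hinv x hx y hy with h | h
    · exact h
    · exact absurd h (List.not_mem_nil)
  | case2 visited a t hq node hv hq' ih =>
    intro hinv x hx y hy
    rw [pvLoopA] at hx ⊢
    rw [dif_pos hv] at hx ⊢
    refine ih ?_ x hx y hy
    intro z hz w hw
    rcases hinv z hz w hw with h | h
    · exact Or.inl h
    · rw [← List.dropLast_concat_getLast (l := a :: t) (by simp), List.mem_append] at h
      rcases h with h | h
      · exact Or.inr h
      · rw [List.mem_singleton] at h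
        subst h
        exact Or.inl ((PySem.Set.contains_iff _ _).mp hv)
  | case3 visited a t hq node hv hq' ih =>
    intro hinv x hx y hy
    rw [pvLoopA] at hx ⊢
    rw [dif_neg hv] at hx ⊢
    refine ih ?_ x hx y hy
    intro z hz w hw
    rcases (PySem.Set.mem_add _ _ _).mp hz with h | h
    · rcases hinv z h w hw with h' | h'
      · exact Or.inl ((PySem.Set.mem_add _ _ _).mpr (Or.inl h'))
      · rw [← List.dropLast_concat_getLast (l := a :: t) (by simp), List.mem_append] at h'
        rcases h' with h' | h'
        · exact Or.inr (List.mem_append.mpr (Or.inl h'))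
        · rw [List.mem_singleton] at h'
          subst h'
          exact Or.inl ((PySem.Set.mem_add _ _ _).mpr (Or.inr rfl))
    · subst h
      have hw' := List.mem_filter.mp hw
      by_cases hwv : w ∈ PySem.Set.add visited ((a :: t).getLast (by simp))
      · exact Or.inl hwv
      · refine Or.inr (List.mem_append.mpr (Or.inr ?_))
        refine List.mem_filter.mpr ⟨hw'.1, ?_⟩
        simp only [Bool.and_eq_true, Bool.not_eq_true']
        refine ⟨?_, by simpa using hw'.2⟩
        exact Bool.eq_false_iff.mpr (fun hc => hwv ((PySem.Set.contains_iff _ _).mp hc))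

theorem pvLoopB_subset (failed : List String) (rem : PySem.Dict String (List String))
    (U : List String) (hU : ∀ k, ∀ y ∈ rem.getD k [], y ∈ U)
    (P : String → Prop) (hP : ∀ x, P x → ∀ y ∈ pvAdj failed rem x, P y) :
    ∀ (visited frontier : PySem.Set String),
      (∀ x ∈ visited, P x) → (∀ x ∈ frontier, P x) →
      ∀ x ∈ pvLoopB failed rem U hU visited frontier, P x := by
  intro visited frontier
  induction visited, frontier using pvLoopB.induct failed rem U hU with
  | case1 visited =>
    intro hvP _ x hx
    rw [pvLoopB] at hx
    exact hvP x hx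
  | case2 visited a t ih =>
    intro hvP hfP x hx
    rw [pvLoopB] at hx
    have hF' : ∀ y ∈ PySem.Set.diff
        (PySem.Set.ofList ((a :: t).flatMap
          (fun node => (rem.getD node []).filter (fun nb => !(failed.contains nb)))))
        visited, P y := by
      intro y hy
      have h1 := ((PySem.Set.mem_diff _ _ _).mp hy).1
      rw [PySem.Set.mem_ofList, List.mem_flatMap] at h1
      obtain ⟨node, hnode, hmem⟩ := h1
      exact hP node (hfP node hnode) y hmem
    refine ih ?_ hF' x hx
    intro y hy
    rcases (PySem.Set.mem_union _ _ _).mp hy with h | h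
    · exact hvP y h
    · exact hF' y h

theorem pvLoopB_mono (failed : List String) (rem : PySem.Dict String (List String))
    (U : List String) (hU : ∀ k, ∀ y ∈ rem.getD k [], y ∈ U) :
    ∀ (visited frontier : PySem.Set String),
      ∀ x ∈ visited, x ∈ pvLoopB failed rem U hU visited frontier := by
  intro visited frontier
  induction visited, frontier using pvLoopB.induct failed rem U hU with
  | case1 visited =>
    intro x hx
    rw [pvLoopB]
    exact hx
  | case2 visited a t ih =>
    intro x hx
    rw [pvLoopB]
    exact ih x ((PySem.Set.mem_union _ _ _).mpr (Or.inl hx))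

theorem pvLoopB_closed (failed : List String) (rem : PySem.Dict String (List String))
    (U : List String) (hU : ∀ k, ∀ y ∈ rem.getD k [], y ∈ U) :
    ∀ (visited frontier : PySem.Set String),
      (∀ x ∈ visited, x ∈ frontier ∨ ∀ y ∈ pvAdj failed rem x, y ∈ visited) →
      ∀ x ∈ pvLoopB failed rem U hU visited frontier,
        ∀ y ∈ pvAdj failed rem x, y ∈ pvLoopB failed rem U hU visited frontier := by
  intro visited frontier
  induction visited, frontier using pvLoopB.induct failed rem U hU with
  | case1 visited =>
    intro hinv x hx y hy
    rw [pvLoopB] at hx ⊢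
    rcases hinv x hx with h | h
    · exact absurd h (List.not_mem_nil)
    · exact h y hy
  | case2 visited a t ih =>
    intro hinv x hx y hy
    rw [pvLoopB] at hx ⊢
    refine ih ?_ x hx y hy
    intro z hz
    by_cases hzF : z ∈ PySem.Set.diff
        (PySem.Set.ofList ((a :: t).flatMap
          (fun node => (rem.getD node []).filter (fun nb => !(failed.contains nb)))))
        visited
    · exact Or.inl hzF
    · have hzv : z ∈ visited := by
        rcases (PySem.Set.mem_union _ _ _).mp hz with h | h
        · exact h
        · exact absurd h hzF
      rcases hinv z hzv with h | h
      · -- z is in the old frontier: its neighbours land in visited ∪ new frontier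
        refine Or.inr ?_
        intro w hw
        by_cases hwv : w ∈ visited
        · exact (PySem.Set.mem_union _ _ _).mpr (Or.inl hwv)
        · refine (PySem.Set.mem_union _ _ _).mpr (Or.inr ?_)
          refine (PySem.Set.mem_diff _ _ _).mpr ⟨?_, hwv⟩
          rw [PySem.Set.mem_ofList, List.mem_flatMap]
          exact ⟨z, h, hw⟩
      · exact Or.inr fun w hw => (PySem.Set.mem_union _ _ _).mpr (Or.inl (h w hw))

-- reachability from `start` along pvAdj
def pvReach (failed : List String) (rem : PySem.Dict String (List String))
    (start : String) : String → Prop :=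
  Relation.ReflTransGen (fun a b => b ∈ pvAdj failed rem a) start

theorem pvLoopA_mem_iff (failed : List String) (rem : PySem.Dict String (List String))
    (start : String) :
    ∀ y, y ∈ pvLoopA failed rem (pvUniv rem start) (pvUniv_spec rem start)
        PySem.Set.empty [start]
        (by intro x hx; simp only [List.mem_singleton] at hx; simp [pvUniv, hx]) ↔
      pvReach failed rem start y := by
  intro y
  constructor
  · intro hy
    refine pvLoopA_subset failed rem _ (pvUniv_spec rem start) (pvReach failed rem start)
      (fun x hx z hz => Relation.ReflTransGen.tail hx hz) _ _ _ ?_ ?_ y hy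
    · intro x hx
      exact absurd hx (List.not_mem_nil)
    · intro x hx
      rw [List.mem_singleton] at hx
      subst hx
      exact Relation.ReflTransGen.refl
  · intro hy
    induction hy with
    | refl =>
      exact pvLoopA_mono failed rem _ (pvUniv_spec rem start) _ _ _ start
        (Or.inr List.mem_cons_self)
    | tail hab hbc ih =>
      exact pvLoopA_closed failed rem _ (pvUniv_spec rem start) _ _ _
        (fun x hx => absurd hx (List.not_mem_nil)) _ ih _ hbc

theorem pvLoopB_mem_iff (failed : List String) (rem : PySem.Dict String (List String))
    (start : String) :
    ∀ y, y ∈ pvLoopB failed rem (pvUniv rem start) (pvUniv_spec rem start)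
        (PySem.Set.ofList [start]) (PySem.Set.ofList [start]) ↔
      pvReach failed rem start y := by
  intro y
  have hstart : ∀ x ∈ PySem.Set.ofList [start], x = start := by
    intro x hx
    rw [PySem.Set.mem_ofList, List.mem_singleton] at hx
    exact hx
  constructor
  · intro hy
    refine pvLoopB_subset failed rem _ (pvUniv_spec rem start) (pvReach failed rem start)
      (fun x hx z hz => Relation.ReflTransGen.tail hx hz) _ _ ?_ ?_ y hy
    · intro x hx
      exact hstart x hx ▸ Relation.ReflTransGen.refl
    · intro x hx
      exact hstart x hx ▸ Relation.ReflTransGen.refl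
  · intro hy
    induction hy with
    | refl =>
      exact pvLoopB_mono failed rem _ (pvUniv_spec rem start) _ _ start
        ((PySem.Set.mem_ofList _ _).mpr List.mem_cons_self)
    | tail hab hbc ih =>
      exact pvLoopB_closed failed rem _ (pvUniv_spec rem start) _ _
        (fun x hx => Or.inl (hstart x hx ▸ (PySem.Set.mem_ofList _ _).mpr List.mem_cons_self)) _ ih _ hbc

-- ===== VERDICT (by name: the statement is the Claim_ definition above) =====
theorem check_partition_py_spec : Claim_equal_check_partition_py := by
  intro graph failed _
  unfold Spec_check_partition_py check_partition_py check_partition_py_alt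
  cases h : (pvRemaining graph failed).keys with
  | nil => rfl
  | cons start ks =>
    dsimp only
    congr 1
    rw [Bool.eq_iff_iff, PySem.Set.equal_iff, PySem.Set.equal_iff]
    constructor
    · intro hall x
      rw [← hall x, pvLoopA_mem_iff, ← pvLoopB_mem_iff]
    · intro hall x
      rw [← hall x, pvLoopB_mem_iff, ← pvLoopA_mem_iff]
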